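-- pv_equiv track=rewrite | github.com/psj8532/problem_solving | BOJ/그리디/폴리오미노.py | solution
-- ===== SOURCE A (Python) =====
-- def solution(board):
--     poliomino = ['AAAA', 'BB']
--     x_cnt = 0
--     candidate = []
--     for ch in board:
--         if ch == 'X': x_cnt += 1
--         else:
--             if x_cnt:
--                 if x_cnt & 1: return -1
--                 candidate.append(x_cnt)
--                 x_cnt = 0
--             candidate.append('.')
--     else:
--         if x_cnt & 1: return -1
--         elif x_cnt: candidate.append(x_cnt)
--
--     answer = ''
--
--     for cnt in candidate:
--         if cnt == '.': answer += cnt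
--         else:
--             answer += poliomino[0] * (cnt // 4)
--             answer += poliomino[1] * ((cnt % 4) // 2)
--
--     return answer
-- ===== SOURCE B (Python) =====
-- def solution(board):
--     # Single pass over maximal runs of equal characters (two-pointer run scan);
--     # no intermediate candidate list of int/'.' markers is built.
--     pieces = []
--     i = 0
--     n = len(board)
--     while i < n:
--         j = i
--         while j < n and board[j] == board[i]:
--             j += 1
--         run = j - i
--         if board[i] == 'X':
--             if run & 1:
--                 return -1
--             pieces.append('AAAA' * (run // 4) + 'BB' * ((run % 4) // 2))
--         else:
--             pieces.append('.' * run)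
--         i = j
--     return ''.join(pieces)
-- ===== Notes on version B (the rewrite author's own statement) =====
-- stated objective: alternative
-- what changed: Replaces A's two-phase scheme (char-by-char counter building an intermediate candidate list of ints and '.' markers, then a second rendering loop) with a single two-pointer scan over maximal runs of equal characters that emits each rendered piece directly and joins the pieces at the end.
-- outside the precondition, e.g. on solution('X'): A returns -1, B returns -1
import Mathlib
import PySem

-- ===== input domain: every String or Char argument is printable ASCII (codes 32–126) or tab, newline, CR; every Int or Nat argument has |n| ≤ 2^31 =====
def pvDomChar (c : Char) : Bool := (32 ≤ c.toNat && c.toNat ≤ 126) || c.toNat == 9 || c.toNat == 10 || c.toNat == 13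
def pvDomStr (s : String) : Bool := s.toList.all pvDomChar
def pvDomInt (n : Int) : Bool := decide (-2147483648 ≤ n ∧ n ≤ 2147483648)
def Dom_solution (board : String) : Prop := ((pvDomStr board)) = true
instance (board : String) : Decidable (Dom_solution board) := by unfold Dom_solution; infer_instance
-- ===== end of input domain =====

-- B replaces A's two-phase candidate-list build + render with a single scan over maximal
-- equal-character runs (objective: alternative, same cost). Proved for return values on Pre_.

-- ===== PORT A =====
-- rendering of one count: 'AAAA' * (cnt // 4) then 'BB' * ((cnt % 4) // 2)
def pieceChars (n : Nat) : List Char :=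
  (List.replicate (n / 4) ['A','A','A','A']).flatten ++ (List.replicate (n % 4 / 2) ['B','B']).flatten

-- A's first loop: candidate list of X-run counts (some k) and '.' markers (none);
-- `none` result = Python's `return -1` (the int -1, outside Pre_solution).
def aLoop : List Char → Nat → List (Option Nat) → Option (List (Option Nat))
  | [], k, cand => if k % 2 = 1 then none else if k ≠ 0 then some (cand ++ [some k]) else some cand
  | c :: rest, k, cand =>
    if c = 'X' then aLoop rest (k + 1) cand
    else if k ≠ 0 then
      (if k % 2 = 1 then none else aLoop rest 0 (cand ++ [some k, none]))
    else aLoop rest 0 (cand ++ [none])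

-- A's second loop: answer accumulator over the candidate list
def aRender (cand : List (Option Nat)) : List Char :=
  cand.foldl (fun answer cnt =>
    match cnt with
    | none => answer ++ ['.']
    | some n => (answer ++ (List.replicate (n / 4) ['A','A','A','A']).flatten)
                  ++ (List.replicate (n % 4 / 2) ['B','B']).flatten) []

def solution (board : String) : String :=
  match aLoop board.toList 0 [] with
  | none => "-1"   -- Python returns the int -1 here; these inputs are outside Pre_solution
  | some cand => String.ofList (aRender cand)

-- ===== PORT B =====
-- one pass over maximal runs of equal characters (the two-pointer scan of Source B);
-- returns the list `pieces`, `none` = Python's `return -1` (outside Pre_solution)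
def bGo : List Char → Option (List (List Char))
  | [] => some []
  | c :: rest =>
    let run := 1 + (rest.takeWhile (· == c)).length
    let d := rest.dropWhile (· == c)
    if c = 'X' then
      if run % 2 = 1 then none
      else (bGo d).map (fun ps => pieceChars run :: ps)
    else (bGo d).map (fun ps => List.replicate run '.' :: ps)
termination_by l => l.length
decreasing_by all_goals (simp only [List.length_cons]; exact Nat.lt_succ_of_le (List.length_dropWhile_le _ _))

def solution_alt (board : String) : String :=
  match bGo board.toList with
  | none => "-1"   -- Python returns the int -1 here; outside Pre_solution
  | some pieces => String.ofList pieces.flatten   -- ''.join(pieces)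

-- ===== PRECONDITION & SPEC =====
-- checker: every maximal run of 'X' has even length (b = parity of the current X run is even)
def evenXRunsAux : List Char → Bool → Bool
  | [], b => b
  | c :: rest, b => if c = 'X' then evenXRunsAux rest (!b) else (b && evenXRunsAux rest true)

-- Pre_ excludes boards containing an odd-length maximal run of 'X': there A (and B) return
-- the Python int -1, which is not a value of the declared return type str.
def Pre_solution (board : String) : Prop := evenXRunsAux board.toList true = true
instance (board : String) : Decidable (Pre_solution board) := by unfold Pre_solution; infer_instance
def pvWitness_solution : String := "XX.aXXXX"

def Spec_solution (board : String) (out : String) : Prop := out = solution_alt board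
instance (board : String) (out : String) : Decidable (Spec_solution board out) := by unfold Spec_solution; infer_instance

-- ===== CLAIM (what is proved, stated in full; the proofs are below) =====
def Claim_equal_solution : Prop := ∀ (board : String), Dom_solution board → Pre_solution board → Spec_solution board (solution board)

-- ===== LEMMAS AND PROOFS =====
-- the rendering of one candidate entry
def gA (cnt : Option Nat) : List Char :=
  match cnt with
  | none => ['.']
  | some n => pieceChars n

theorem aRender_aux (cs : List (Option Nat)) : ∀ (a : List Char),
    cs.foldl (fun answer cnt =>
      match cnt with
      | none => answer ++ ['.']
      | some n => (answer ++ (List.replicate (n / 4) ['A','A','A','A']).flatten)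
                    ++ (List.replicate (n % 4 / 2) ['B','B']).flatten) a
      = a ++ cs.flatMap gA := by
  induction cs with
  | nil => intro a; simp
  | cons c cs ih =>
      intro a
      cases c <;> (rw [List.foldl_cons, ih]; simp [gA, pieceChars])

theorem aRender_eq (cand : List (Option Nat)) : aRender cand = cand.flatMap gA := by
  unfold aRender
  rw [aRender_aux]
  simp

-- the common run-by-run specification both ports reduce to
def F : List Char → Nat → Option (List Char)
  | [], k => if k % 2 = 1 then none else some (pieceChars k)
  | c :: l, k =>
    if c = 'X' then F l (k + 1)
    else if k ≠ 0 then
      (if k % 2 = 1 then none else (F l 0).map (fun s => pieceChars k ++ '.' :: s))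
    else (F l 0).map (fun s => '.' :: s)

theorem pieceChars_zero : pieceChars 0 = [] := by simp [pieceChars]

theorem aLoop_F : ∀ (l : List Char) (k : Nat) (cand : List (Option Nat)),
    (aLoop l k cand).map aRender = (F l k).map (fun s => aRender cand ++ s) := by
  intro l
  induction l with
  | nil =>
      intro k cand
      by_cases hk : k % 2 = 1
      · simp [aLoop, F, hk]
      · by_cases hk0 : k = 0
        · subst hk0; simp [aLoop, F, aRender_eq, pieceChars_zero]
        · simp [aLoop, F, hk, hk0, aRender_eq, gA]
  | cons c rest ih =>
      intro k cand
      by_cases hc : c = 'X'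
      · simp [aLoop, F, hc, ih]
      · by_cases hk0 : k = 0
        · subst hk0
          simp only [aLoop, F, hc, ne_eq, not_true_eq_false, if_false]
          rw [ih]
          cases F rest 0 <;> simp [aRender_eq, gA]
        · by_cases hk : k % 2 = 1
          · simp [aLoop, F, hc, hk0, hk]
          · simp only [aLoop, F, hc, ne_eq, hk0, not_false_eq_true, if_true, hk,
              if_false]
            rw [ih]
            cases F rest 0 <;> simp [aRender_eq, gA]

theorem F_X_run : ∀ (m : Nat) (d : List Char) (k : Nat),
    F (List.replicate m 'X' ++ d) k = F d (k + m) := by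
  intro m
  induction m with
  | zero => intro d k; simp
  | succ m ih =>
      intro d k
      rw [List.replicate_succ, List.cons_append]
      show F ('X' :: (List.replicate m 'X' ++ d)) k = F d (k + (m + 1))
      rw [show F ('X' :: (List.replicate m 'X' ++ d)) k = F (List.replicate m 'X' ++ d) (k + 1) by
        simp [F]]
      rw [ih, show k + 1 + m = k + (m + 1) by omega]

theorem F_shift (d : List Char) (hd : d.head? ≠ some 'X') (m : Nat) :
    F d m = if m % 2 = 1 then none else (F d 0).map (fun s => pieceChars m ++ s) := by
  cases d with
  | nil =>
      by_cases h : m % 2 = 1 <;> simp [F, h, pieceChars_zero]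
  | cons c d' =>
      have hc : c ≠ 'X' := by simpa using hd
      by_cases hm : m = 0
      · subst hm
        simp only [Nat.zero_mod, if_neg (by decide : ¬ (0 % 2 = 1))]
        cases F (c :: d') 0 <;> simp [pieceChars_zero]
      · by_cases hp : m % 2 = 1
        · simp [F, hc, hm, hp]
        · simp only [F, if_neg hc, ne_eq, hm, not_false_eq_true, if_true, hp, if_false,
            not_true_eq_false]
          cases F d' 0 <;> simp

theorem F_dots (c : Char) (hc : c ≠ 'X') : ∀ (r : Nat) (d : List Char),
    F (List.replicate r c ++ d) 0 = (F d 0).map (fun s => List.replicate r '.' ++ s) := by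
  intro r
  induction r with
  | zero =>
      intro d
      simp only [List.replicate_zero, List.nil_append]
      cases F d 0 <;> simp
  | succ r ih =>
      intro d
      rw [List.replicate_succ, List.cons_append]
      rw [show F (c :: (List.replicate r c ++ d)) 0
            = (F (List.replicate r c ++ d) 0).map (fun s => '.' :: s) by simp [F, hc]]
      rw [ih]
      cases F d 0 <;> simp [List.replicate_succ]

theorem head?_dropWhile_ne (c : Char) (rest : List Char) :
    (rest.dropWhile (· == c)).head? ≠ some c := by
  cases hd : rest.dropWhile (· == c) with
  | nil => simp
  | cons x xs =>
      have hx : (x == c) = false := by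
        have := List.head_dropWhile_not (· == c) (l := rest) (by simp [hd])
        simpa [hd] using this
      simp only [List.head?_cons, ne_eq, Option.some.injEq]
      intro h; subst h; simp at hx

theorem takeWhile_replicate (c : Char) (rest : List Char) :
    rest.takeWhile (· == c) = List.replicate (rest.takeWhile (· == c)).length c := by
  apply List.eq_replicate_of_mem
  intro b hb
  have := List.mem_takeWhile_imp hb
  simpa using this

theorem replicate_one_add (c : Char) (n : Nat) :
    List.replicate (1 + n) c = c :: List.replicate n c := by
  rw [Nat.add_comm, List.replicate_succ]

theorem run_split (c : Char) (rest : List Char) :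
    c :: rest = List.replicate (1 + (rest.takeWhile (· == c)).length) c
                  ++ rest.dropWhile (· == c) := by
  rw [replicate_one_add, List.cons_append]
  nth_rewrite 1 [← List.takeWhile_append_dropWhile (p := (· == c)) (l := rest)]
  rw [← takeWhile_replicate]

theorem bGo_F : ∀ (l : List Char), (bGo l).map List.flatten = F l 0 := by
  intro l
  induction l using bGo.induct with
  | case1 => simp [bGo, F, pieceChars_zero]
  | case2 rest _run hodd =>
      -- odd maximal X-run: both sides are none
      have hodd' : (1 + (List.takeWhile (fun x => x == 'X') rest).length) % 2 = 1 := hodd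
      have hb : bGo ('X' :: rest) = none := by
        simp only [bGo]
        simp [hodd']
      rw [hb, run_split 'X' rest, F_X_run, Nat.zero_add,
        F_shift _ (head?_dropWhile_ne 'X' rest) _, if_pos hodd']
      rfl
  | case3 rest _run _d hodd ih =>
      -- even maximal X-run
      have hodd' : ¬ (1 + (List.takeWhile (fun x => x == 'X') rest).length) % 2 = 1 := hodd
      have hb : bGo ('X' :: rest)
          = (bGo (rest.dropWhile (· == 'X'))).map
              (fun ps => pieceChars (1 + (rest.takeWhile (· == 'X')).length) :: ps) := by
        simp only [bGo]
        simp [hodd']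
      rw [hb, run_split 'X' rest, F_X_run, Nat.zero_add,
        F_shift _ (head?_dropWhile_ne 'X' rest) _, if_neg hodd', ← ih]
      cases bGo (rest.dropWhile (· == 'X')) <;> simp
  | case4 c rest _d hc ih =>
      -- a maximal run of a non-'X' character, rendered as '.'-repetitions
      have hb : bGo (c :: rest)
          = (bGo (rest.dropWhile (· == c))).map
              (fun ps => List.replicate (1 + (rest.takeWhile (· == c)).length) '.' :: ps) := by
        simp only [bGo]
        simp [hc]
      rw [hb, run_split c rest, F_dots c hc, ← ih]
      cases bGo (rest.dropWhile (· == c)) <;> simp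

theorem ports_agree (board : String) : solution board = solution_alt board := by
  unfold solution solution_alt
  have key : (aLoop board.toList 0 []).map aRender = (bGo board.toList).map List.flatten := by
    rw [aLoop_F board.toList 0 [], bGo_F board.toList]
    cases F board.toList 0 <;> simp [aRender_eq]
  cases ha : aLoop board.toList 0 [] <;> cases hb : bGo board.toList <;>
    rw [ha, hb] at key <;> simp_all

-- ===== VERDICT (by name: the statement is the Claim_ definition above) =====
theorem solution_spec : Claim_equal_solution := by
  intro board _ _
  unfold Spec_solution
  exact ports_agree board
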